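-- pv_equiv track=rewrite | github.com/Skyoxima/Cryptography_and_Hashing | double_columnar_tp.py | key_orderer
-- ===== SOURCE A (Python) =====
-- def key_orderer(key):
--   key_list = list(key)
--   sorted_key_list = list(sorted(key))
--   col_order = []
--   for i in range(len(sorted_key_list)):
--     for j in range(len(key_list)):
--       if sorted_key_list[i] == key_list[j] and j not in col_order:
--         col_order.append(j)
--         break
--   return col_order
-- ===== SOURCE B (Python) =====
-- def key_orderer(key):
--     buckets = {}
--     for i, ch in enumerate(key):
--         buckets.setdefault(ch, []).append(i)
--     out = []
--     for ch in sorted(buckets):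
--         out.extend(buckets[ch])
--     return out
-- ===== Notes on version B (the rewrite author's own statement) =====
-- stated objective: faster
-- what changed: A rescans the whole key for the first unused index once per character of the sorted key; B builds a char->positions bucket table in one pass over enumerate(key) and concatenates the buckets over the sorted distinct characters.
import Mathlib
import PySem

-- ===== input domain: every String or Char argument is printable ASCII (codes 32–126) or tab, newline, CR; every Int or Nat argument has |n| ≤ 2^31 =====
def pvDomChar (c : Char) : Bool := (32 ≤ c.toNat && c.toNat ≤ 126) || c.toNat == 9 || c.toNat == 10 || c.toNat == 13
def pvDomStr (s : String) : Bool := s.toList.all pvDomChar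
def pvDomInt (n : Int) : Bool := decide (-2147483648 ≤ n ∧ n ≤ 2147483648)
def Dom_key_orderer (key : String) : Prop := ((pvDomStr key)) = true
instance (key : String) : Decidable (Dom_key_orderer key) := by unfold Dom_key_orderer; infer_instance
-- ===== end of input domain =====

-- B replaces A's quadratic "rescan the key for the first unused index" inner loop by one
-- bucketing pass (char -> ascending index list) followed by a walk over the sorted distinct
-- characters (objective: faster).

-- ===== PORT A =====
-- inner loop: 'for j in range(len(key_list)): if sorted_key_list[i] == key_list[j] and j not in col_order: append; break'
def koInner (c : Char) (col : List Int) : List Char → Int → List Int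
  | [], _ => col
  | x :: xs, j => if c == x && !col.contains j then col ++ [j] else koInner c col xs (j + 1)

def key_orderer (key : String) : List Int :=
  let key_list := key.toList
  let sorted_key_list := PySem.List.sorted key_list (fun c => c) false
  sorted_key_list.foldl (fun col_order c => koInner c col_order key_list 0) []

-- ===== PORT B =====
def key_orderer_alt (key : String) : List Int :=
  let buckets : PySem.Dict Char (List Int) :=
    (PySem.List.enumerate key.toList).foldl
      (fun d p => d.modify p.2 [] (fun v => v ++ [p.1])) PySem.Dict.empty
  (PySem.List.sorted buckets.keys (fun c => c) false).foldl
    (fun out c => out ++ buckets.getD c []) []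

-- ===== PRECONDITION & SPEC =====
def Spec_key_orderer (key : String) (out : List Int) : Prop := out = key_orderer_alt key
instance (key : String) (out : List Int) : Decidable (Spec_key_orderer key out) := by unfold Spec_key_orderer; infer_instance

-- ===== CLAIM (what is proved, stated in full; the proofs are below) =====
def Claim_equal_key_orderer : Prop := ∀ (key : String), Dom_key_orderer key → Spec_key_orderer key (key_orderer key)

-- ===== LEMMAS AND PROOFS =====

-- positions of character c in kl, ascending, as Ints
def posns (kl : List Char) (c : Char) : List Int :=
  ((PySem.List.enumerate kl).filter (fun p => p.2 == c)).map (fun p => p.1)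

theorem koInner_spec (c : Char) (col : List Int) :
    ∀ (xs : List Char) (j : Int),
      koInner c col xs j =
        match ((PySem.List.enumerate xs j).filter
                (fun p => p.2 == c && !col.contains p.1)).head? with
        | some p => col ++ [p.1]
        | none => col := by
  intro xs
  induction xs with
  | nil => intro j; simp [koInner, PySem.List.enumerate]
  | cons x xs ih =>
    intro j
    rw [PySem.List.enumerate_cons]
    by_cases h : (c == x && !col.contains j) = true
    · have hx : (((j, x) : Int × Char).2 == c && !col.contains ((j, x) : Int × Char).1) = true := by
        simp only [Bool.and_eq_true, beq_iff_eq] at h ⊢; exact ⟨h.1.symm, h.2⟩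
      unfold koInner
      rw [if_pos h, List.filter_cons, if_pos hx, List.head?_cons]
    · have hx : ¬ (((j, x) : Int × Char).2 == c && !col.contains ((j, x) : Int × Char).1) = true := by
        simp only [Bool.and_eq_true, beq_iff_eq] at h ⊢; intro hc; exact h ⟨hc.1.symm, hc.2⟩
      unfold koInner
      rw [if_neg h, List.filter_cons, if_neg hx]
      exact ih (j + 1)

theorem posns_pairwise (kl : List Char) (c : Char) :
    (posns kl c).Pairwise (· < ·) := by
  unfold posns
  rw [List.pairwise_map]
  exact List.Pairwise.filter _ (PySem.List.pairwise_lt_enumerate kl 0)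

theorem posns_nodup (kl : List Char) (c : Char) : (posns kl c).Nodup :=
  (posns_pairwise kl c).imp (fun h => ne_of_lt h)

theorem mem_posns (kl : List Char) (c : Char) (j : Int) :
    j ∈ posns kl c ↔ ∃ (k : Nat), ∃ (h : k < kl.length), j = (k : Int) ∧ kl[k] = c := by
  unfold posns
  simp only [List.mem_map, List.mem_filter, PySem.List.mem_enumerate_iff]
  constructor
  · rintro ⟨p, ⟨⟨k, hk, rfl⟩, hc⟩, rfl⟩
    simp only [beq_iff_eq] at hc
    exact ⟨k, hk, by simpa using hc⟩
  · rintro ⟨k, hk, rfl, hc⟩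
    exact ⟨((0 : Int) + k, kl[k]), ⟨⟨k, hk, rfl⟩, by simp [hc]⟩, by simp⟩

theorem posns_disjoint (kl : List Char) {c c' : Char} (h : c ≠ c') (j : Int) :
    j ∈ posns kl c → j ∈ posns kl c' → False := by
  rw [mem_posns, mem_posns]
  rintro ⟨k, hk, rfl, rfl⟩ ⟨k', hk', he, rfl⟩
  exact h (by simp_all)

theorem length_posns (kl : List Char) (c : Char) :
    (posns kl c).length = kl.count c := by
  unfold posns
  rw [List.length_map]
  have : ∀ (s : Int), ((PySem.List.enumerate kl s).filter (fun p => p.2 == c)).length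
      = kl.count c := by
    induction kl with
    | nil => intro s; simp [PySem.List.enumerate]
    | cons x xs ih =>
      intro s
      rw [PySem.List.enumerate_cons, List.filter_cons, List.count_cons]
      by_cases hx : (x == c) = true
      · simp [hx, ih]
      · simp [hx, ih]
  exact this 0

-- the filtered enumerate of char c is posns c paired with c
theorem filter_enumerate_eq_map_posns (kl : List Char) (c : Char) :
    (PySem.List.enumerate kl).filter (fun p => p.2 == c)
      = (posns kl c).map (fun j => (j, c)) := by
  unfold posns
  rw [List.map_map]
  symm
  apply List.map_congr_left ?_ |>.trans (List.map_id _)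
  intro p hp
  have := (List.mem_filter.mp hp).2
  simp only [beq_iff_eq] at this
  simp [Function.comp, ← this]

theorem filter_not_mem_take (l : List Int) (hl : l.Nodup) :
    ∀ (k : Nat) (col : List Int), (∀ j ∈ col, j ∉ l) →
      l.filter (fun j => !(col ++ l.take k).contains j) = l.drop k := by
  induction l with
  | nil => intro k col _; simp
  | cons x xs ih =>
    intro k col hcol
    cases k with
    | zero =>
      simp only [List.take_zero, List.append_nil, List.drop_zero]
      have : ∀ j ∈ (x :: xs), (!(col.contains j)) = true := by
        intro j hj
        simp only [Bool.not_eq_true', List.contains_eq_mem, decide_eq_false_iff_not]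
        exact fun hc => hcol j hc hj
      exact List.filter_eq_self.mpr this
    | succ k =>
      simp only [List.take_succ_cons, List.drop_succ_cons, List.filter_cons]
      have hx : (!(col ++ x :: xs.take k).contains x) = false := by simp
      rw [hx, if_neg (by simp)]
      have hrw : xs.filter (fun j => !(col ++ x :: xs.take k).contains j)
          = xs.filter (fun j => !((col ++ [x]) ++ xs.take k).contains j) := by
        apply List.filter_congr
        intro j hj
        simp only [List.contains_eq_mem, List.mem_append, List.mem_cons]
        apply congrArg
        rw [decide_eq_decide]
        simp only [List.not_mem_nil, or_false]
        tauto
      rw [hrw]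
      exact ih (List.Nodup.of_cons hl) k (col ++ [x])
        (by
          intro j hj
          rcases List.mem_append.mp hj with h | h
          · exact fun hm => hcol j h (List.mem_cons_of_mem _ hm)
          · rw [List.mem_singleton] at h
            subst h
            exact fun hm => (List.nodup_cons.mp hl).1 hm)

theorem koInner_step (kl : List Char) (c : Char) (col : List Int) (k : Nat)
    (hk : k < (posns kl c).length)
    (hcol : ∀ j ∈ col, j ∉ posns kl c) :
    koInner c (col ++ (posns kl c).take k) kl 0
      = col ++ (posns kl c).take (k + 1) := by
  rw [koInner_spec]
  have hfilter :
      (PySem.List.enumerate kl).filter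
          (fun p => p.2 == c && !(col ++ (posns kl c).take k).contains p.1)
        = ((posns kl c).drop k).map (fun j => (j, c)) := by
    have h1 : (PySem.List.enumerate kl).filter
          (fun p => p.2 == c && !(col ++ (posns kl c).take k).contains p.1)
        = ((PySem.List.enumerate kl).filter (fun p => p.2 == c)).filter
            (fun p => !(col ++ (posns kl c).take k).contains p.1) := by
      rw [List.filter_filter]
      apply List.filter_congr; intro p _; rw [Bool.and_comm]
    rw [h1, filter_enumerate_eq_map_posns, List.filter_map]
    rw [show ((fun p : Int × Char => !(col ++ (posns kl c).take k).contains p.1) ∘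
          (fun j : Int => (j, c))) = (fun j : Int => !(col ++ (posns kl c).take k).contains j)
        from rfl]
    rw [filter_not_mem_take (posns kl c) (posns_nodup kl c) k col hcol]
  rw [hfilter]
  have hd : (posns kl c).drop k = (posns kl c)[k] :: (posns kl c).drop (k + 1) :=
    List.drop_eq_getElem_cons hk
  rw [hd]
  simp only [List.map_cons, List.head?_cons]
  rw [List.append_assoc, ← List.take_concat_get' _ _ hk]

theorem group_fold (kl : List Char) (c : Char) (col : List Int)
    (hcol : ∀ j ∈ col, j ∉ posns kl c) :
    ∀ (n k : Nat), k + n = (posns kl c).length →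
      (List.replicate n c).foldl (fun col' cc => koInner cc col' kl 0)
          (col ++ (posns kl c).take k)
        = col ++ posns kl c := by
  intro n
  induction n with
  | zero =>
    intro k hk
    simp only [Nat.add_zero] at hk
    simp [List.take_of_length_le (le_of_eq hk.symm)]
  | succ n ih =>
    intro k hk
    rw [List.replicate_succ, List.foldl_cons]
    rw [koInner_step kl c col k (by omega) hcol]
    exact ih (k + 1) (by omega)

theorem outer_fold (kl : List Char) :
    ∀ (D : List Char), D.Nodup →
      ∀ (col : List Int), (∀ c ∈ D, ∀ j ∈ col, j ∉ posns kl c) →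
        (D.flatMap (fun c => List.replicate (kl.count c) c)).foldl
            (fun col' cc => koInner cc col' kl 0) col
          = col ++ D.flatMap (fun c => posns kl c) := by
  intro D
  induction D with
  | nil => intro _ col _; simp
  | cons c D ih =>
    intro hnd col hcol
    rw [List.flatMap_cons, List.foldl_append]
    have hgroup : (List.replicate (kl.count c) c).foldl
        (fun col' cc => koInner cc col' kl 0) col = col ++ posns kl c := by
      have := group_fold kl c col (hcol c (List.mem_cons_self)) (kl.count c) 0
        (by rw [length_posns]; omega)
      simpa using this
    rw [hgroup]
    rw [ih (List.Nodup.of_cons hnd) (col ++ posns kl c) ?_]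
    · simp
    · intro c' hc' j hj
      rcases List.mem_append.mp hj with h | h
      · exact hcol c' (List.mem_cons_of_mem _ hc') j h
      · intro hmem
        exact posns_disjoint kl (fun he => (List.nodup_cons.mp hnd).1 (by rwa [he])) j h hmem

theorem pairwise_le_replicate (n : Nat) (c : Char) :
    (List.replicate n c).Pairwise (fun a b : Char => a ≤ b) := by
  induction n with
  | zero => simp
  | succ n ih =>
    rw [List.replicate_succ]
    exact List.Pairwise.cons (fun b hb => by rw [List.eq_of_mem_replicate hb]) ih

theorem count_flatMap_replicate (kl : List Char) (a : Char) :
    ∀ (D : List Char), D.Nodup →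
      (D.flatMap (fun c => List.replicate (kl.count c) c)).count a
        = if a ∈ D then kl.count a else 0 := by
  intro D
  induction D with
  | nil => simp
  | cons c D ih =>
    intro hnd
    rw [List.flatMap_cons, List.count_append, List.count_replicate,
      ih (List.Nodup.of_cons hnd)]
    by_cases hac : a = c
    · subst hac
      simp [if_neg ((List.nodup_cons.mp hnd).1)]
    · simp [hac, Ne.symm hac]

theorem sorted_eq_flatMap_replicate (kl : List Char) :
    PySem.List.sorted kl (fun c => c) false
      = (PySem.List.sorted (PySem.Set.ofList kl) (fun c => c) false).flatMap
          (fun c => List.replicate (kl.count c) c) := by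
  set D := PySem.List.sorted (PySem.Set.ofList kl) (fun c => c) false with hD
  have hDnd : D.Nodup := (PySem.List.sorted_ofList_pairwise_lt kl).imp (fun h => ne_of_lt h)
  have hDmem : ∀ c, c ∈ D ↔ c ∈ kl := by
    intro c
    rw [hD, PySem.List.mem_sorted, PySem.Set.mem_ofList]
  apply PySem.List.sorted_id_eq_of_perm_of_pairwise
  · rw [List.perm_iff_count]
    intro a
    rw [count_flatMap_replicate kl a D hDnd]
    by_cases ha : a ∈ D
    · simp [ha]
    · rw [if_neg ha]
      symm
      exact List.count_eq_zero.mpr (fun hm => ha ((hDmem a).mpr hm))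
  · apply List.pairwise_flatMap.mpr
    constructor
    · intro c _
      exact pairwise_le_replicate _ c
    · apply List.Pairwise.imp ?_ (PySem.List.sorted_ofList_pairwise_lt kl)
      intro c c' hlt a ha b hb
      rw [List.eq_of_mem_replicate ha, List.eq_of_mem_replicate hb]
      exact le_of_lt hlt

theorem buckets_getD (kl : List Char) (c : Char) :
    ((PySem.List.enumerate kl).foldl
        (fun d p => d.modify p.2 [] (fun v => v ++ [p.1])) PySem.Dict.empty).getD c []
      = posns kl c := by
  have hswap : (PySem.List.enumerate kl).foldl
        (fun d p => d.modify p.2 [] (fun v => v ++ [p.1])) PySem.Dict.empty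
      = ((PySem.List.enumerate kl).map Prod.swap).foldl
          (fun d q => d.modify q.1 [] (fun v => v ++ [q.2])) PySem.Dict.empty := by
    rw [List.foldl_map]
    rfl
  rw [hswap, PySem.Dict.getD_foldl_modify_append]
  unfold posns
  rw [List.filter_map, List.map_map]
  simp only [PySem.Dict.getD_empty, List.nil_append]
  rfl

theorem buckets_keys (kl : List Char) :
    ((PySem.List.enumerate kl).foldl
        (fun d p => d.modify p.2 [] (fun v => v ++ [p.1])) PySem.Dict.empty).keys
      = PySem.Set.ofList kl := by
  rw [PySem.Dict.keys_foldl_modify_key (PySem.List.enumerate kl) (fun p => p.2) []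
    (fun _ p => (fun v => v ++ [p.1])) PySem.Dict.empty]
  rw [show (PySem.Dict.empty : PySem.Dict Char (List Int)).keys = ([] : List Char) from rfl]
  rw [PySem.List.map_snd_enumerate]
  exact PySem.Set.update_empty kl

theorem main_eq (kl : List Char) :
    (PySem.List.sorted kl (fun c => c) false).foldl (fun col c => koInner c col kl 0) []
      = (PySem.List.sorted
            ((PySem.List.enumerate kl).foldl
              (fun d p => d.modify p.2 [] (fun v => v ++ [p.1])) PySem.Dict.empty).keys
            (fun c => c) false).foldl
          (fun out c =>
            out ++ ((PySem.List.enumerate kl).foldl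
              (fun d p => d.modify p.2 [] (fun v => v ++ [p.1])) PySem.Dict.empty).getD c [])
          [] := by
  have hf : (fun (out : List Int) (c : Char) =>
        out ++ ((PySem.List.enumerate kl).foldl
          (fun d p => d.modify p.2 [] (fun v => v ++ [p.1])) PySem.Dict.empty).getD c [])
      = fun out c => out ++ posns kl c := by
    funext out c
    rw [buckets_getD]
  rw [buckets_keys kl, hf]
  have hDnd : (PySem.List.sorted (PySem.Set.ofList kl) (fun c => c) false).Nodup :=
    (PySem.List.sorted_ofList_pairwise_lt kl).imp (fun h => ne_of_lt h)
  rw [sorted_eq_flatMap_replicate kl,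
    outer_fold kl _ hDnd [] (by intro c _ j hj; cases hj),
    PySem.List.foldl_append_eq_flatMap]

-- ===== VERDICT (by name: the statement is the Claim_ definition above) =====
theorem key_orderer_spec : Claim_equal_key_orderer := by
  intro key _
  exact main_eq key.toList
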